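-- pv_equiv track=rewrite | github.com/dschinzo/Competitive-Programming | src/HackerRank/solution/practice/mathematics/fundamentals/jim-and-the-jokes/solution.py | solve
-- ===== SOURCE A (Python) =====
-- def solve(dates):
--     cnt = {}
--     for d in dates:
--         if d[0] == 1:
--             continue
--         for n in str(d[1]):
--             if int(n) >= d[0]:
--                 break
--         else:
--             num = int(str(d[1]),d[0])
--             if num in cnt:
--                 cnt[num] += 1
--             else:
--                 cnt[num] = 1
--
--     return sum([v*(v-1)//2 for v in cnt.values()])
-- ===== SOURCE B (Python) =====
-- def solve(dates):
--     vals = []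
--     for base, day in dates:
--         if base == 1:
--             continue
--         digits = str(day)
--         if all(int(c) < base for c in digits):
--             vals.append(int(digits, base))
--     vals.sort()
--     total = 0
--     i = 0
--     n = len(vals)
--     while i < n:
--         j = i + 1
--         while j < n and vals[j] == vals[i]:
--             j += 1
--         total += (j - i) * (j - i - 1) // 2
--         i = j
--     return total
-- ===== Notes on version B (the rewrite author's own statement) =====
-- stated objective: alternative
-- what changed: The second phase replaces A's incremental dict counter (and sum over its values) by collecting the converted values into a list, sorting it, and summing run*(run-1)//2 over maximal runs of equal values in one scan.
import Mathlib
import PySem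

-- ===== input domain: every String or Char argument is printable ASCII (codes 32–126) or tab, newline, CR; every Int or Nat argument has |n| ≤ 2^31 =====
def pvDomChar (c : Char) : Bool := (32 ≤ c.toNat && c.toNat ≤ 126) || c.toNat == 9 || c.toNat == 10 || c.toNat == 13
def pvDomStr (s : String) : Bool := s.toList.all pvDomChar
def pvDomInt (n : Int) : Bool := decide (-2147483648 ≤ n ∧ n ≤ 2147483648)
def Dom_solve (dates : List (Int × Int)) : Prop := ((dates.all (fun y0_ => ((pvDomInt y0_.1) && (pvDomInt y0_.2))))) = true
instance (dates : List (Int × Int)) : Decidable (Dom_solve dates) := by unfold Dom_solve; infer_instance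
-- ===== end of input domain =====

-- B groups equal converted values by sorting the collected list and summing C(run,2) over
-- consecutive runs, instead of A's incremental dict counter; alternative decomposition, not faster.

-- ===== PORT A =====
-- the inner 'for n in str(d[1]): if int(n) >= d[0]: break / else:' loop, True = no break
def solveDigitsOkA (b : Int) : List Char → Bool
  | [] => true
  | c :: cs => if b ≤ (PySem.Int.ofChars? [c]).getD 0 then false else solveDigitsOkA b cs

def solveStepA (cnt : PySem.Dict Int Int) (d : Int × Int) : PySem.Dict Int Int :=
  if d.1 = 1 then cnt
  else if solveDigitsOkA d.1 (PySem.Int.toChars d.2) then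
    -- int(str(d[1]), d[0]); getD 0 is unreachable inside Pre_solve (ValueError is excluded there)
    let num := (PySem.Int.ofCharsBase? (PySem.Int.toChars d.2) d.1).getD 0
    match cnt.get? num with
    | some v => cnt.insert num (v + 1)
    | none => cnt.insert num 1
  else cnt

def solve (dates : List (Int × Int)) : Int :=
  let cnt := dates.foldl solveStepA PySem.Dict.empty
  (cnt.values.map (fun v => PySem.Int.floordiv (v * (v - 1)) 2)).sum

-- ===== PORT B =====
-- all(int(c) < base for c in digits)
def solveAllDigitsB (b : Int) (cs : List Char) : Bool :=
  cs.all (fun c => (PySem.Int.ofChars? [c]).getD 0 < b)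

-- the collection loop: append int(digits, base) for each valid date
def solveValsB (dates : List (Int × Int)) : List Int :=
  dates.foldl (fun vals d =>
    if d.1 = 1 then vals
    else
      let digits := PySem.Int.toChars d.2
      if solveAllDigitsB d.1 digits then
        vals ++ [(PySem.Int.ofCharsBase? digits d.1).getD 0]
      else vals) []

-- the two nested while loops over the sorted list: one run of equal values per step
def solveRunsB : List Int → Int
  | [] => 0
  | x :: xs =>
    let run : Int := ((xs.takeWhile (fun y => y == x)).length : Int) + 1
    PySem.Int.floordiv (run * (run - 1)) 2 + solveRunsB (xs.dropWhile (fun y => y == x))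
termination_by m => m.length
decreasing_by
  exact Nat.lt_succ_of_le (List.length_dropWhile_le _ _)

def solve_alt (dates : List (Int × Int)) : Int :=
  solveRunsB (PySem.List.sorted (solveValsB dates) (fun x => x) false)

-- ===== PRECONDITION & SPEC =====
-- Pre_ excludes exactly the inputs where Python A raises ValueError: a date with base ≠ 1 whose
-- day is negative (int('-') on the sign character) or whose base exceeds 36 (int(s, base)).
def Pre_solve (dates : List (Int × Int)) : Prop :=
  ∀ p ∈ dates, p.1 = 1 ∨ (0 ≤ p.2 ∧ p.1 ≤ 36)
instance (dates : List (Int × Int)) : Decidable (Pre_solve dates) := by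
  unfold Pre_solve; infer_instance

def pvWitness_solve : (List (Int × Int)) := [(10, 12), (8, 14), (5, 13), (2, 1)]

def Spec_solve (dates : List (Int × Int)) (out : Int) : Prop := out = solve_alt dates
instance (dates : List (Int × Int)) (out : Int) : Decidable (Spec_solve dates out) := by
  unfold Spec_solve; infer_instance

-- ===== CLAIM (what is proved, stated in full; the proofs are below) =====
def Claim_equal_solve : Prop :=
  ∀ (dates : List (Int × Int)), Dom_solve dates → Pre_solve dates → Spec_solve dates (solve dates)

-- ===== LEMMAS AND PROOFS =====

-- what one date contributes to the collected multiset of converted values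
def solveContrib (d : Int × Int) : Option Int :=
  if d.1 = 1 then none
  else if solveAllDigitsB d.1 (PySem.Int.toChars d.2) then
    some ((PySem.Int.ofCharsBase? (PySem.Int.toChars d.2) d.1).getD 0)
  else none

-- the order-free value both programs compute: sum of C(multiplicity, 2) over distinct values
def solvePairSum (l : List Int) : Int :=
  ((PySem.Set.ofList l).map
    (fun k => PySem.Int.floordiv ((l.count k : Int) * ((l.count k : Int) - 1)) 2)).sum

theorem solveDigitsOkA_eq (b : Int) (cs : List Char) :
    solveDigitsOkA b cs = solveAllDigitsB b cs := by
  induction cs with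
  | nil => simp [solveDigitsOkA, solveAllDigitsB]
  | cons c cs ih =>
    simp only [solveDigitsOkA, solveAllDigitsB, List.all_cons]
    by_cases h : b ≤ (PySem.Int.ofChars? [c]).getD 0
    · simp [h, not_lt.mpr h]
    · simpa [solveAllDigitsB, h, not_le.mp h] using ih

theorem solveStepA_eq (cnt : PySem.Dict Int Int) (d : Int × Int) :
    solveStepA cnt d =
      match solveContrib d with
      | none => cnt
      | some v => cnt.insert v (cnt.getD v 0 + 1) := by
  unfold solveStepA solveContrib
  rw [solveDigitsOkA_eq]
  by_cases h1 : d.1 = 1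
  · simp [h1]
  · by_cases h2 : solveAllDigitsB d.1 (PySem.Int.toChars d.2)
    · simp only [h1, h2, if_true, if_false]
      cases hg : cnt.get? ((PySem.Int.ofCharsBase? (PySem.Int.toChars d.2) d.1).getD 0) with
      | some v => simp [PySem.Dict.getD_eq_get?_getD, hg]
      | none => simp [PySem.Dict.getD_eq_get?_getD, hg]
    · simp [h1, h2]

theorem solveFoldA_eq (dates : List (Int × Int)) (cnt : PySem.Dict Int Int) :
    dates.foldl solveStepA cnt =
      (dates.filterMap solveContrib).foldl (fun c v => c.insert v (c.getD v 0 + 1)) cnt := by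
  induction dates generalizing cnt with
  | nil => rfl
  | cons d ds ih =>
    simp only [List.foldl_cons, List.filterMap_cons, solveStepA_eq]
    cases solveContrib d with
    | none => exact ih cnt
    | some v => simp [ih]

theorem solveValsB_eq_filterMap (dates : List (Int × Int)) :
    solveValsB dates = dates.filterMap solveContrib := by
  unfold solveValsB
  suffices h : ∀ (acc : List Int), dates.foldl (fun vals d =>
      if d.1 = 1 then vals
      else
        let digits := PySem.Int.toChars d.2
        if solveAllDigitsB d.1 digits then
          vals ++ [(PySem.Int.ofCharsBase? digits d.1).getD 0]
        else vals) acc = acc ++ dates.filterMap solveContrib by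
    simpa using h []
  induction dates with
  | nil => simp
  | cons d ds ih =>
    intro acc
    simp only [List.foldl_cons, List.filterMap_cons]
    by_cases h1 : d.1 = 1
    · simp [solveContrib, h1, ih]
    · by_cases h2 : solveAllDigitsB d.1 (PySem.Int.toChars d.2)
      · simp [solveContrib, h1, h2, ih]
      · simp [solveContrib, h1, h2, ih]

theorem solve_eq_pairSum (dates : List (Int × Int)) :
    solve dates = solvePairSum (dates.filterMap solveContrib) := by
  unfold solve solvePairSum
  rw [solveFoldA_eq, PySem.Dict.foldl_insert_getD_add_one_eq_counter]
  simp only [PySem.Dict.values, PySem.Dict.items_counter, List.map_map]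
  rfl

-- inside the dropped suffix of a sorted list bounded below by x, x does not occur
theorem solve_not_mem_dropWhile (x : Int) (xs : List Int)
    (hb : ∀ y ∈ xs, x ≤ y) (hp : xs.Pairwise (· ≤ ·)) :
    x ∉ xs.dropWhile (fun y => y == x) := by
  induction xs with
  | nil => simp
  | cons y ys ih =>
    by_cases h : y = x
    · rw [List.dropWhile_cons_of_pos (by simp [h])]
      exact ih (fun z hz => hb z (by simp [hz])) hp.tail
    · rw [List.dropWhile_cons_of_neg (by simp [h])]
      intro hmem
      rcases List.mem_cons.mp hmem with h1 | h1
      · exact h h1.symm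
      · have hxy : x ≤ y := hb y (by simp)
        have hyx : y ≤ x := (List.pairwise_cons.mp hp).1 x h1
        exact h (le_antisymm hyx hxy)

theorem solveRunsB_eq_pairSum (n : Nat) :
    ∀ m : List Int, m.length ≤ n → m.Pairwise (· ≤ ·) → solveRunsB m = solvePairSum m := by
  induction n with
  | zero =>
    intro m hm _
    have : m = [] := List.eq_nil_of_length_eq_zero (Nat.le_zero.mp hm)
    subst this
    simp [solveRunsB, solvePairSum, PySem.Set.ofList_nil]
  | succ n ih =>
    intro m hm hp
    match m with
    | [] => simp [solveRunsB, solvePairSum, PySem.Set.ofList_nil]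
    | x :: xs =>
      set t := xs.takeWhile (fun y => y == x) with ht
      set d := xs.dropWhile (fun y => y == x) with hd
      have hxs : t ++ d = xs := List.takeWhile_append_dropWhile
      have hball : ∀ y ∈ xs, x ≤ y := fun y hy => (List.pairwise_cons.mp hp).1 y hy
      have htx : ∀ y ∈ t, y = x := by
        intro y hy
        have := List.mem_takeWhile_imp hy
        simpa using this
      have hxd : x ∉ d := solve_not_mem_dropWhile x xs hball hp.tail
      have hdsub : d.Sublist xs := List.dropWhile_sublist _
      have hdp : d.Pairwise (· ≤ ·) := hp.tail.sublist hdsub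
      have hdlen : d.length ≤ n := by
        have h1 : d.length ≤ xs.length := List.length_dropWhile_le _ _
        have h2 : (x :: xs).length = xs.length + 1 := List.length_cons ..
        omega
      -- counts in the full list
      have hct : t.count x = t.length := List.count_eq_length.mpr fun y hy => (htx y hy).symm
      have hcd0 : d.count x = 0 := List.count_eq_zero.mpr hxd
      have hcx : (x :: xs).count x = t.length + 1 := by
        rw [List.count_cons, ← hxs, List.count_append, hct, hcd0]
        simp
      have hcother : ∀ k ∈ d, (x :: xs).count k = d.count k := by
        intro k hk
        have hkx : k ≠ x := fun h => hxd (h ▸ hk)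
        have hkt : t.count k = 0 := List.count_eq_zero.mpr fun h => hkx (htx k h)
        rw [List.count_cons, ← hxs, List.count_append, hkt]
        simp [Ne.symm hkx]
      -- the distinct-value index lists are permutations
      have hnodup2 : (x :: PySem.Set.ofList d).Nodup := by
        refine List.nodup_cons.mpr ⟨?_, PySem.Set.nodup_ofList d⟩
        rw [PySem.Set.mem_ofList]; exact hxd
      have hperm : (PySem.Set.ofList (x :: xs)).Perm (x :: PySem.Set.ofList d) := by
        rw [List.perm_ext_iff_of_nodup (PySem.Set.nodup_ofList (x :: xs)) hnodup2]
        intro k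
        simp only [PySem.Set.mem_ofList, List.mem_cons]
        constructor
        · rintro (rfl | hk)
          · exact Or.inl rfl
          · rw [← hxs] at hk
            rcases List.mem_append.mp hk with h | h
            · exact Or.inl (htx _ h)
            · exact Or.inr h
        · rintro (rfl | hk)
          · exact Or.inl rfl
          · refine Or.inr ?_
            rw [← hxs]
            exact List.mem_append.mpr (Or.inr hk)
      -- unfold one run of B's scan
      have hstep : solveRunsB (x :: xs) =
          PySem.Int.floordiv (((t.length : Int) + 1) * (((t.length : Int) + 1) - 1)) 2
            + solveRunsB d := by
        rw [solveRunsB]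
      rw [hstep, ih d hdlen hdp]
      unfold solvePairSum
      rw [List.Perm.sum_eq (hperm.map _), List.map_cons, List.sum_cons, hcx]
      have htail : (PySem.Set.ofList d).map
            (fun k => PySem.Int.floordiv (((x :: xs).count k : Int) * (((x :: xs).count k : Int) - 1)) 2)
          = (PySem.Set.ofList d).map
            (fun k => PySem.Int.floordiv ((d.count k : Int) * ((d.count k : Int) - 1)) 2) := by
        refine List.map_congr_left fun k hk => ?_
        rw [hcother k (by simpa [PySem.Set.mem_ofList] using hk)]
      rw [htail]
      push_cast
      ring_nf

theorem solvePairSum_perm (l m : List Int) (h : m.Perm l) :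
    solvePairSum m = solvePairSum l := by
  unfold solvePairSum
  have hperm : (PySem.Set.ofList m).Perm (PySem.Set.ofList l) := by
    rw [List.perm_ext_iff_of_nodup (PySem.Set.nodup_ofList m) (PySem.Set.nodup_ofList l)]
    intro k
    simp only [PySem.Set.mem_ofList]
    exact h.mem_iff
  rw [List.Perm.sum_eq (hperm.map _)]
  refine congrArg List.sum (List.map_congr_left fun k _ => ?_)
  rw [h.count_eq]

theorem solve_alt_eq_pairSum (dates : List (Int × Int)) :
    solve_alt dates = solvePairSum (dates.filterMap solveContrib) := by
  unfold solve_alt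
  have hsp : (PySem.List.sorted (solveValsB dates) (fun x => x) false).Pairwise (· ≤ ·) :=
    PySem.List.sorted_pairwise ..
  rw [solveRunsB_eq_pairSum (PySem.List.sorted (solveValsB dates) (fun x => x) false).length
    _ le_rfl hsp]
  rw [solvePairSum_perm _ _ (PySem.List.sorted_perm ..), solveValsB_eq_filterMap]

-- ===== VERDICT (by name: the statement is the Claim_ definition above) =====
theorem solve_spec : Claim_equal_solve := by
  intro dates _ _
  unfold Spec_solve
  rw [solve_eq_pairSum, solve_alt_eq_pairSum]
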